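-- pv_equiv track=rewrite | github.com/KIMDHH92/PSC-RISK-APP-AI- | PSC-RISK-APP-AI/streamlit_app_single_fix1.py | strip_trailing_port_terms
-- ===== SOURCE A (Python) =====
-- TRAILING_PORT_TERMS = [
--     "pt","port","prt","harbour","harbor","hbr","terminal","term","ter","wharf","anchorage","anch",
--     "pier","p.","quay","jetty","jet","dock","dck","dep","dept","dep."
-- ]
--
-- def strip_trailing_port_terms(s: str) -> str:
--     t = s.strip()
--     for _ in range(2):
--         parts = t.split()
--         if not parts:
--             break
--         last = parts[-1].lower().strip(".,()[]{}")
--         if last in TRAILING_PORT_TERMS: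
--             t = " ".join(parts[:-1])
--         else:
--             break
--     return t
-- ===== SOURCE B (Python) =====
-- PUNCT = ".,()[]{}"
-- TRAILING_PORT_TERMS = [
--     "pt","port","prt","harbour","harbor","hbr","terminal","term","ter","wharf","anchorage","anch",
--     "pier","p.","quay","jetty","jet","dock","dck","dep","dept","dep."
-- ]
--
-- def strip_trailing_port_terms(s: str) -> str:
--     t = s.strip()
--     parts = t.split()
--     n = 0
--     for w in reversed(parts):
--         if n >= 2:
--             break
--         if w.lower().strip(PUNCT) in TRAILING_PORT_TERMS:
--             n += 1
--         else:
--             break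
--     if n == 0:
--         return t
--     return " ".join(parts[:len(parts) - n])
-- ===== Notes on version B (the rewrite author's own statement) =====
-- stated objective: simpler
-- what changed: B splits once, counts trailing port-term words from the end (capped at 2), and returns the stripped string unchanged when the count is zero or one join of a single slice otherwise, instead of A's loop of repeated split/join passes.
import Mathlib
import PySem

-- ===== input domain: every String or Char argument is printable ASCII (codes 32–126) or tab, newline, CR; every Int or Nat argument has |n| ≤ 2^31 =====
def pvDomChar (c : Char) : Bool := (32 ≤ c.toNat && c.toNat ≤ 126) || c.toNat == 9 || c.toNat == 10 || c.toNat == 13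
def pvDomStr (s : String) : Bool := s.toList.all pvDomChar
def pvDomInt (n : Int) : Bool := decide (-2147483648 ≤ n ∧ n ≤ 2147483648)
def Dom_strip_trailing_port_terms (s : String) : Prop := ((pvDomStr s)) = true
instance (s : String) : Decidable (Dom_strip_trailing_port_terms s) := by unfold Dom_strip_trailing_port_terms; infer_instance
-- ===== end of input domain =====

-- B splits once and counts trailing port-term words (capped at 2) before one slice+join,
-- instead of A's repeated split/join loop; objective: simpler.

-- ===== PORT A =====
-- module-level constant TRAILING_PORT_TERMS, as lists of chars
def pvTerms : List (List Char) :=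
  ["pt","port","prt","harbour","harbor","hbr","terminal","term","ter","wharf","anchorage","anch",
   "pier","p.","quay","jetty","jet","dock","dck","dep","dept","dep."].map String.toList

def pvPunct : List Char := ".,()[]{}".toList

-- w.lower().strip(".,()[]{}")  (both Pythons normalize a word with this same expression)
def pvNorm (w : List Char) : List Char := PySem.Chars.stripChars (PySem.Chars.lower w) pvPunct

-- A's 'for _ in range(2)' loop, with its two 'break's
def pvLoopA : Nat → List Char → List Char
  | 0, t => t
  | n + 1, t =>
    let parts := PySem.Chars.split₀ t
    if parts.isEmpty then t
    else if pvTerms.contains (pvNorm parts.getLast!) then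
      pvLoopA n (PySem.Chars.join [' '] parts.dropLast)
    else t

def strip_trailing_port_terms (s : String) : String :=
  String.ofList (pvLoopA 2 (PySem.Chars.strip s.toList))

-- ===== PORT B =====
-- B's 'for w in reversed(parts)' count loop (argument is parts.reverse)
def pvCountB : List (List Char) → Nat → Nat
  | [], n => n
  | w :: ws, n =>
    if n ≥ 2 then n
    else if pvTerms.contains (pvNorm w) then pvCountB ws (n + 1)
    else n

def strip_trailing_port_terms_alt (s : String) : String :=
  let t := PySem.Chars.strip s.toList
  let parts := PySem.Chars.split₀ t
  let n := pvCountB parts.reverse 0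
  if n = 0 then String.ofList t
  else String.ofList (PySem.Chars.join [' '] (parts.take (parts.length - n)))

-- ===== PRECONDITION & SPEC =====
def Spec_strip_trailing_port_terms (s : String) (out : String) : Prop := out = strip_trailing_port_terms_alt s
instance (s : String) (out : String) : Decidable (Spec_strip_trailing_port_terms s out) := by unfold Spec_strip_trailing_port_terms; infer_instance

-- ===== CLAIM (what is proved, stated in full; the proofs are below) =====
def Claim_equal_strip_trailing_port_terms : Prop := ∀ (s : String), Dom_strip_trailing_port_terms s → Spec_strip_trailing_port_terms s (strip_trailing_port_terms s)

-- ===== LEMMAS AND PROOFS =====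

-- a word produced by split₀: nonempty and whitespace-free
def pvGood (w : List Char) : Prop := w ≠ [] ∧ ∀ c ∈ w, PySem.Chars.isspace c = false

theorem pv_go_nil (cur : List Char) (acc : List (List Char)) :
    PySem.Chars.split₀.go [] cur acc =
      (if cur.isEmpty then acc.reverse else (cur.reverse :: acc).reverse) := by
  simp [PySem.Chars.split₀.go]

theorem pv_go_cons (c : Char) (rest cur : List Char) (acc : List (List Char)) :
    PySem.Chars.split₀.go (c :: rest) cur acc =
      (if PySem.Chars.isspace c = true then
        (if cur.isEmpty then PySem.Chars.split₀.go rest [] acc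
         else PySem.Chars.split₀.go rest [] (cur.reverse :: acc))
       else PySem.Chars.split₀.go rest (c :: cur) acc) := by
  simp [PySem.Chars.split₀.go]

theorem pv_go_nonspace (w : List Char) (h : ∀ c ∈ w, PySem.Chars.isspace c = false) :
    ∀ t cur acc, PySem.Chars.split₀.go (w ++ t) cur acc =
      PySem.Chars.split₀.go t (w.reverse ++ cur) acc := by
  induction w with
  | nil => intro t cur acc; simp
  | cons c w ih =>
    intro t cur acc
    have hc : PySem.Chars.isspace c = false := h c (by simp)
    rw [List.cons_append, pv_go_cons, hc]
    simp only [Bool.false_eq_true, if_false]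
    rw [ih (fun c' hc' => h c' (by simp [hc'])) t (c :: cur) acc]
    simp

theorem pv_go_good (s : List Char) :
    ∀ cur acc, (∀ c ∈ cur, PySem.Chars.isspace c = false) → (∀ w ∈ acc, pvGood w) →
      ∀ w ∈ PySem.Chars.split₀.go s cur acc, pvGood w := by
  induction s with
  | nil =>
    intro cur acc hc ha w hw
    rw [pv_go_nil] at hw
    by_cases hcur : cur.isEmpty
    · simp only [hcur, if_true, List.mem_reverse] at hw
      exact ha w hw
    · simp only [hcur, Bool.false_eq_true, if_false, List.reverse_cons, List.mem_append,
        List.mem_reverse, List.mem_singleton] at hw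
      rcases hw with hw | hw
      · exact ha w hw
      · subst hw
        refine ⟨by simpa [List.isEmpty_iff] using hcur, ?_⟩
        intro c hcmem; exact hc c (by simpa using hcmem)
  | cons c rest ih =>
    intro cur acc hc ha w hw
    rw [pv_go_cons] at hw
    by_cases hsp : PySem.Chars.isspace c = true
    · simp only [hsp, if_true] at hw
      by_cases hcur : cur.isEmpty
      · simp only [hcur, if_true] at hw
        exact ih [] acc (by simp) ha w hw
      · simp only [hcur, Bool.false_eq_true, if_false] at hw
        refine ih [] (cur.reverse :: acc) (by simp) ?_ w hw
        intro v hv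
        rw [List.mem_cons] at hv
        rcases hv with hv | hv
        · subst hv
          refine ⟨by simpa [List.isEmpty_iff] using hcur, ?_⟩
          intro d hd; exact hc d (by simpa using hd)
        · exact ha v hv
    · simp only [hsp, Bool.false_eq_true, if_false] at hw
      refine ih (c :: cur) acc ?_ ha w hw
      intro d hd
      rw [List.mem_cons] at hd
      rcases hd with hd | hd
      · subst hd; simpa using hsp
      · exact hc d hd

theorem pv_split_good (t : List Char) : ∀ w ∈ PySem.Chars.split₀ t, pvGood w := by
  intro w hw
  exact pv_go_good t [] [] (by simp) (by simp) w (by simpa [PySem.Chars.split₀] using hw)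

theorem pv_join_go (ws : List (List Char)) (h : ∀ w ∈ ws, pvGood w) :
    ∀ acc, PySem.Chars.split₀.go (PySem.Chars.join [' '] ws) [] acc = acc.reverse ++ ws := by
  induction ws with
  | nil => intro acc; simp [PySem.Chars.join_nil, pv_go_nil]
  | cons w tail ih =>
    intro acc
    obtain ⟨hne, hns⟩ := h w (by simp)
    cases tail with
    | nil =>
      rw [PySem.Chars.join_singleton, show w = w ++ [] from by simp,
        pv_go_nonspace w hns [] [] acc, pv_go_nil, if_neg (by simp [List.isEmpty_iff, hne])]
      simp
    | cons w' rest =>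
      rw [PySem.Chars.join_cons_cons, List.append_assoc, pv_go_nonspace w hns _ [] acc,
        List.append_nil, List.singleton_append, pv_go_cons,
        if_pos (show PySem.Chars.isspace ' ' = true by decide),
        if_neg (by simp [List.isEmpty_iff, hne])]
      rw [List.reverse_reverse, ih (fun v hv => h v (by simp [hv])) (w :: acc)]
      simp

theorem pv_split_join (ws : List (List Char)) (h : ∀ w ∈ ws, pvGood w) :
    PySem.Chars.split₀ (PySem.Chars.join [' '] ws) = ws := by
  rw [PySem.Chars.split₀, pv_join_go ws h []]
  simp

theorem pv_split_nil : PySem.Chars.split₀ [] = [] := by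
  simp [PySem.Chars.split₀, pv_go_nil]

theorem pv_count_two (l : List (List Char)) : pvCountB l 2 = 2 := by
  cases l <;> simp [pvCountB]

-- the central fact: A's two-pass loop equals B's count-then-slice, for any t
theorem pv_main (t : List Char) :
    pvLoopA 2 t =
      (let parts := PySem.Chars.split₀ t
       let n := pvCountB parts.reverse 0
       if n = 0 then t
       else PySem.Chars.join [' '] (parts.take (parts.length - n))) := by
  simp only []
  rcases (PySem.Chars.split₀ t).eq_nil_or_concat with hP | ⟨ws, w, hP⟩
  · simp [pvLoopA, hP, pvCountB]
  · have hgood : ∀ v ∈ PySem.Chars.split₀ t, pvGood v := pv_split_good t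
    have hgw : ∀ v ∈ ws, pvGood v := fun v hv => hgood v (by rw [hP]; simp [hv])
    by_cases hm : pvNorm w ∈ pvTerms
    · -- last word matches; A re-splits join(' ', parts[:-1]), which is exactly ws again
      have hsplit2 : PySem.Chars.split₀ (PySem.Chars.join [' '] ws) = ws :=
        pv_split_join ws hgw
      rcases ws.eq_nil_or_concat with hws | ⟨vs, v, hws⟩ <;> subst hws
      · -- only one word: both sides end with the empty string
        have hA : pvLoopA 2 t = [] := by
          simp [pvLoopA, hP, hm, PySem.Chars.join_nil, pv_split_nil]
        have hn : pvCountB (PySem.Chars.split₀ t).reverse 0 = 1 := by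
          rw [hP]; simp [pvCountB, hm]
        rw [hA, hn, if_neg (by omega), hP]
        simp [PySem.Chars.join_nil]
      · simp only [List.concat_eq_append] at hP hsplit2
        by_cases hm2 : pvNorm v ∈ pvTerms
        · -- second-to-last word also matches: drop two words
          have hA : pvLoopA 2 t = PySem.Chars.join [' '] vs := by
            simp [pvLoopA, hP, hm, hsplit2, hm2]
          have hn : pvCountB (PySem.Chars.split₀ t).reverse 0 = 2 := by
            rw [hP]; simp [pvCountB, hm, hm2, pv_count_two]
          have htake : (PySem.Chars.split₀ t).take ((PySem.Chars.split₀ t).length - 2) = vs := by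
            rw [hP]
            rw [show vs ++ [v] ++ [w] = vs ++ ([v] ++ [w]) from by simp]
            rw [show (vs ++ ([v] ++ [w])).length - 2 = vs.length from by simp]
            exact List.take_left
          rw [hA, hn, if_neg (by omega), htake]
        · -- only the last word matches: drop one word
          have hA : pvLoopA 2 t = PySem.Chars.join [' '] (vs ++ [v]) := by
            simp [pvLoopA, hP, hm, hsplit2, hm2]
          have hn : pvCountB (PySem.Chars.split₀ t).reverse 0 = 1 := by
            rw [hP]; simp [pvCountB, hm, hm2]
          have htake : (PySem.Chars.split₀ t).take ((PySem.Chars.split₀ t).length - 1) = vs ++ [v] := by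
            rw [hP]
            rw [show (vs ++ [v] ++ [w]).length - 1 = (vs ++ [v]).length from by simp]
            exact List.take_left
          rw [hA, hn, if_neg (by omega), htake]
    · -- last word does not match: both sides return t unchanged
      have hA : pvLoopA 2 t = t := by
        simp [pvLoopA, hP, hm]
      have hn : pvCountB (PySem.Chars.split₀ t).reverse 0 = 0 := by
        rw [hP]; simp [pvCountB, hm]
      rw [hA, hn, if_pos rfl]

-- ===== VERDICT (by name: the statement is the Claim_ definition above) =====
theorem strip_trailing_port_terms_spec : Claim_equal_strip_trailing_port_terms := by
  intro s _
  unfold Spec_strip_trailing_port_terms strip_trailing_port_terms strip_trailing_port_terms_alt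
  rw [pv_main]
  simp only []
  split <;> rfl
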